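-- pv_equiv track=rewrite | github.com/daniel-bara/AdventOfCode2023 | Day 12/tasks.py | possible_offsets
-- ===== SOURCE A (Python) =====
-- def possible_offsets(sequence: str, group_len: int, end=False):
--     for i in range(len(sequence)-group_len+1):
--         if all(map(lambda char: char in ("?", "#"), sequence[i:i+group_len]))\
--                 and not any(map(lambda char: char == "#", sequence[:i]))\
--                 and safe_list_get(sequence, i+group_len, ".") in ("?", "."):
--             if end == False:
--                 yield i
--             else:
--                 if all(map(lambda char: char in ("?", "."), sequence[i+group_len:])):
--                     yield i
--
-- def safe_list_get(l, index, default):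
--     try:
--         return l[index]
--     except IndexError:
--         return default
-- ===== SOURCE B (Python) =====
-- def possible_offsets(sequence, group_len, end=False):
--     # One backward pass precomputes, for every position, the length of the run of
--     # '?'/'#' characters starting there and whether the whole tail is made of '?'/'.';
--     # one forward pass then emits offsets, stopping at the first '#'.
--     n = len(sequence)
--     run = [0] * (n + 1)       # run[i] = length of maximal '?#'-run starting at i
--     tail_ok = [True] * (n + 1)  # tail_ok[i] = all of sequence[i:] is '?' or '.'
--     for i in range(n - 1, -1, -1):
--         c = sequence[i]
--         run[i] = run[i + 1] + 1 if c in "?#" else 0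
--         tail_ok[i] = tail_ok[i + 1] and c in "?."
--     offsets = []
--     for i in range(n - group_len + 1):
--         if run[i] >= group_len:
--             j = i + group_len
--             if tail_ok[j] if end else (j == n or sequence[j] in "?."):
--                 offsets.append(i)
--         if i < n and sequence[i] == "#":
--             break
--     return offsets
-- ===== Notes on version B (the rewrite author's own statement) =====
-- stated objective: faster
-- what changed: A rescans the window, the whole prefix and (for end) the whole tail for every candidate offset; B precomputes in one backward pass the '?#'-run length and an all-'?.'-tail flag per position, then emits offsets in one forward pass that stops at the first '#'.
-- outside the precondition, e.g. on possible_offsets('#', -1, True): A returns [], B returns [0]; on possible_offsets('?.', -1, False): A returns [0, 1, 2, 3], B raises IndexError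
import Mathlib
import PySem

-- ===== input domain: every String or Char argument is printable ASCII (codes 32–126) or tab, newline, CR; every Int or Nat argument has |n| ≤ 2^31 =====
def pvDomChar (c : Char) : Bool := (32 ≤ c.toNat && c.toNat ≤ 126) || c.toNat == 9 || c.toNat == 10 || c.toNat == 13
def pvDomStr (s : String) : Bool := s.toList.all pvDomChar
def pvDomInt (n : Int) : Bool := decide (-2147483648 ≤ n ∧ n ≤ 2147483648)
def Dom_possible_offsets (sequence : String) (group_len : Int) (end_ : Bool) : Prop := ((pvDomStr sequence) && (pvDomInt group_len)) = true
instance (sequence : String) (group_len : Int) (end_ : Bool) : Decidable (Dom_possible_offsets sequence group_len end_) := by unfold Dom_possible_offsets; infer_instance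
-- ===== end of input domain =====

-- B replaces A's per-offset rescans of window/prefix/tail by one backward precomputation
-- (run lengths of '?#' and an all-'?.' tail flag) plus one forward pass that stops at the
-- first '#'; objective: faster (one pass instead of nested scans).

-- char-class tests shared by both sides: Python's  char in ("?", "#")  /  char in ("?", ".")
def pvInQH (c : Char) : Bool := c == '?' || c == '#'
def pvInQD (c : Char) : Bool := c == '?' || c == '.'

-- ===== PORT A =====
-- safe_list_get(l, index, default): l[index] with IndexError replaced by the default
def safe_list_get (l : List Char) (index : Int) (default : Char) : Char :=
  (PySem.List.pyGet? l index).getD default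

def possible_offsets (sequence : String) (group_len : Int) (end_ : Bool) : List Int :=
  let s := sequence.toList
  (PySem.List.pyRange 0 ((s.length : Int) - group_len + 1) 1).foldl
    (fun acc i =>
      if ((PySem.List.slice s (some i) (some (i + group_len))).all pvInQH
          && !((PySem.List.slice s none (some i)).any (fun c => c == '#'))
          && pvInQD (safe_list_get s (i + group_len) '.')) then
        (if end_ == false then acc ++ [i]
         else if (PySem.List.slice s (some (i + group_len)) none).all pvInQD then acc ++ [i]
         else acc)
      else acc) []

-- ===== PORT B =====
-- run[i] of Source B: length of the maximal '?#'-run starting at a position (backward recurrence)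
def runAt : List Char → Nat
  | [] => 0
  | c :: t => if pvInQH c then runAt t + 1 else 0

-- tail_ok[i] of Source B: the whole tail is made of '?' / '.'
def tailOk : List Char → Bool
  | [] => true
  | c :: t => tailOk t && pvInQD c

-- the emit test of Source B's forward loop at the position whose suffix is suf
def hitAt (g : Nat) (end_ : Bool) (suf : List Char) : Bool :=
  decide (g ≤ runAt suf) &&
  (if end_ then tailOk (suf.drop g)
   else match suf.drop g with
        | [] => true            -- j == n
        | c :: _ => pvInQD c)   -- sequence[j] in "?."

-- Source B's forward loop: walk the suffixes, stop at the first '#'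
def fwdLoop (g : Nat) (end_ : Bool) : List Char → Int → List Int
  | [], i => if 0 < g then [] else if hitAt g end_ [] then [i] else []
  | c :: t, i =>
    if (c :: t).length < g then []
    else (if hitAt g end_ (c :: t) then [i] else [])
         ++ (if c == '#' then [] else fwdLoop g end_ t (i + 1))

def possible_offsets_alt (sequence : String) (group_len : Int) (end_ : Bool) : List Int :=
  fwdLoop group_len.toNat end_ sequence.toList 0

-- ===== PRECONDITION & SPEC =====
-- Pre_ excludes negative group_len: a group length is a count, no behaviour is specified
-- there, and A's value arises from Python's negative-index/slice wraparound in
-- safe_list_get and the tail slice; B's loop indexes past its arrays there.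
def Pre_possible_offsets (sequence : String) (group_len : Int) (end_ : Bool) : Prop := 0 ≤ group_len
instance (sequence : String) (group_len : Int) (end_ : Bool) : Decidable (Pre_possible_offsets sequence group_len end_) := by unfold Pre_possible_offsets; infer_instance
def pvWitness_possible_offsets : String × Int × Bool := ("?#?.#", 2, true)

def Spec_possible_offsets (sequence : String) (group_len : Int) (end_ : Bool) (out : List Int) : Prop := out = possible_offsets_alt sequence group_len end_
instance (sequence : String) (group_len : Int) (end_ : Bool) (out : List Int) : Decidable (Spec_possible_offsets sequence group_len end_ out) := by unfold Spec_possible_offsets; infer_instance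

-- ===== CLAIM (what is proved, stated in full; the proofs are below) =====
def Claim_equal_possible_offsets : Prop := ∀ (sequence : String) (group_len : Int) (end_ : Bool), Dom_possible_offsets sequence group_len end_ → Pre_possible_offsets sequence group_len end_ → Spec_possible_offsets sequence group_len end_ (possible_offsets sequence group_len end_)

-- ===== LEMMAS AND PROOFS =====

-- A's per-offset emit condition, in pure list form (index k, group length G as naturals)
def condA (s : List Char) (G : Nat) (end_ : Bool) (k : Nat) : Bool :=
  ((s.drop k).take G).all pvInQH
  && !((s.take k).any (fun c => c == '#'))
  && pvInQD ((s[k+G]?).getD '.')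
  && (if end_ then (s.drop (k+G)).all pvInQD else true)

lemma runAt_ge_iff (suf : List Char) (G : Nat) (h : G ≤ suf.length) :
    decide (G ≤ runAt suf) = (suf.take G).all pvInQH := by
  induction suf generalizing G with
  | nil => cases G with
    | zero => simp [runAt]
    | succ G' => simp at h
  | cons c t ih =>
    cases G with
    | zero => simp
    | succ G' =>
      simp only [List.take_succ_cons, List.all_cons, runAt]
      by_cases hc : pvInQH c
      · simp [hc, ih G' (by simpa using h)]
      · simp [hc]
      
lemma tailOk_eq_all (l : List Char) : tailOk l = l.all pvInQD := by
  induction l with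
  | nil => rfl
  | cons c t ih => simp [tailOk, ih, Bool.and_comm]

lemma condA_false_of_hash (s : List Char) (G : Nat) (e : Bool) (k j : Nat)
    (hk : k ≤ j) (hhash : '#' ∈ s.take k) : condA s G e j = false := by
  have : '#' ∈ s.take j := by
    have h2 : (s.take j).take k = s.take k := by
      rw [List.take_take, Nat.min_eq_left hk]
    exact List.mem_of_mem_take (h2 ▸ hhash)
  simp only [condA]
  have : (s.take j).any (fun c => c == '#') = true := by
    simp only [List.any_eq_true]; exact ⟨'#', this, by simp⟩
  simp [this]

lemma condA_eq_hitAt (G : Nat) (e : Bool) (pre suf : List Char)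
    (hpre : '#' ∉ pre) (hlen : G ≤ suf.length) :
    condA (pre ++ suf) G e pre.length = hitAt G e suf := by
  unfold condA hitAt
  have hg : (pre ++ suf)[pre.length + G]? = suf[G]? := by
    rw [List.getElem?_append_right (by omega)]
    congr 1
    omega
  have hd : (pre ++ suf).drop (pre.length + G) = suf.drop G := by
    rw [← List.drop_drop, List.drop_left]
  have hany : (pre.any (fun c => c == '#')) = false := by
    simp only [List.any_eq_false]
    intro c hc
    simp only [beq_iff_eq]
    exact fun h => hpre (h ▸ hc)
  rw [List.drop_left, List.take_left, hg, hd, hany, ← runAt_ge_iff suf G hlen]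
  have hhead : suf[G]? = (suf.drop G).head? := List.head?_drop.symm
  cases e with
  | false =>
    cases hds : suf.drop G with
    | nil => simp [hhead, hds, pvInQD]
    | cons c r => simp [hhead, hds]
  | true =>
    rw [tailOk_eq_all]
    cases hds : suf.drop G with
    | nil => simp [hhead, hds, pvInQD]
    | cons c r =>
      simp only [hhead, hds, List.head?_cons, Option.getD_some, List.all_cons,
        Bool.not_false, Bool.true_and]
      cases pvInQD c <;> simp

lemma fwdLoop_nil_of_lt (G : Nat) (e : Bool) (suf : List Char) (i : Int)
    (h : suf.length < G) : fwdLoop G e suf i = [] := by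
  cases suf with
  | nil => simp [fwdLoop]; omega
  | cons c t =>
    simp only [fwdLoop]
    rw [if_pos h]

lemma main_lemma (G : Nat) (e : Bool) (suf : List Char) : ∀ (pre : List Char),
    '#' ∉ pre → G ≤ suf.length →
    List.map (fun k : Nat => (k : Int))
        ((List.range' pre.length (suf.length - G + 1)).filter (condA (pre ++ suf) G e))
      = fwdLoop G e suf (pre.length : Int) := by
  induction suf with
  | nil =>
    intro pre hpre hlen
    have hG : G = 0 := by simpa using hlen
    subst hG
    have hcond : condA (pre ++ []) 0 e pre.length = true := by
      rw [condA_eq_hitAt 0 e pre [] hpre (by simp)]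
      cases e <;> rfl
    have hhit : hitAt 0 e [] = true := by cases e <;> rfl
    rw [List.append_nil] at hcond
    simp [List.range'_one, hcond, fwdLoop, hhit]
  | cons c t IH =>
    intro pre hpre hlen
    have hsplit : (c :: t).length - G + 1 = ((c :: t).length - G) + 1 := rfl
    rw [hsplit, List.range'_succ, List.filter_cons,
      condA_eq_hitAt G e pre (c :: t) hpre hlen]
    have hlt : ¬ (c :: t).length < G := by
      simp only [List.length_cons] at hlen ⊢
      omega
    have hfl : fwdLoop G e (c :: t) (pre.length : Int)
        = (if hitAt G e (c :: t) then [(pre.length : Int)] else [])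
          ++ (if c == '#' then [] else fwdLoop G e t ((pre.length : Int) + 1)) := by
      simp only [fwdLoop]
      rw [if_neg hlt]
    rw [hfl]
    by_cases hc : c = '#'
    · have hrest : (List.range' (pre.length + 1) ((c :: t).length - G)).filter
          (condA (pre ++ c :: t) G e) = [] := by
        rw [List.filter_eq_nil_iff]
        intro j hj
        have hjge : pre.length + 1 ≤ j := (List.mem_range'_1.mp hj).1
        rw [condA_false_of_hash (pre ++ c :: t) G e (pre.length + 1) j hjge ?_]
        · simp
        · have htake : (pre ++ c :: t).take (pre.length + 1) = pre ++ [c] := by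
            rw [List.append_cons pre c t]
            exact List.take_left' (by simp)
          rw [htake]
          simp [hc]
      rw [hrest]
      simp only [hc, beq_self_eq_true, if_true, List.append_nil]
      cases hitAt G e ('#' :: t) <;> simp
    · have hpre' : '#' ∉ pre ++ [c] := by
        simp only [List.mem_append, List.mem_singleton]
        rintro (h1 | h2)
        · exact hpre h1
        · exact hc h2.symm
      rw [if_neg (by simpa using hc : ¬ (c == '#') = true)]
      by_cases hG : G ≤ t.length
      · have hIH := IH (pre ++ [c]) hpre' hG
        rw [← List.append_cons pre c t] at hIH
        have hlen' : (pre ++ [c]).length = pre.length + 1 := by simp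
        rw [hlen'] at hIH
        have hcnt : (c :: t).length - G = t.length - G + 1 := by
          simp only [List.length_cons]
          omega
        have hcast : ((pre.length + 1 : Nat) : Int) = (pre.length : Int) + 1 := by push_cast; ring
        rw [hcast] at hIH
        rw [hcnt]
        cases hhit : hitAt G e (c :: t) with
        | false => simpa using hIH
        | true => simp only [if_true, List.map_cons, List.singleton_append, hIH]
      · have hcnt : (c :: t).length - G = 0 := by
          simp only [List.length_cons]
          omega
        rw [hcnt]
        rw [fwdLoop_nil_of_lt G e t ((pre.length : Int) + 1)
          (by simp only [List.length_cons] at hlen; omega)]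
        cases hitAt G e (c :: t) <;> simp

-- A's fold body, rewritten in the pure-list form of condA
lemma bodyA_eq (s : List Char) (G : Nat) (e : Bool) (acc : List Int) (k : Nat) :
    (if ((PySem.List.slice s (some (k : Int)) (some ((k : Int) + (G : Int)))).all pvInQH
        && !((PySem.List.slice s none (some (k : Int))).any (fun c => c == '#'))
        && pvInQD (safe_list_get s ((k : Int) + (G : Int)) '.')) then
      (if e == false then acc ++ [(k : Int)]
       else if (PySem.List.slice s (some ((k : Int) + (G : Int))) none).all pvInQD then acc ++ [(k : Int)]
       else acc)
    else acc)
    = if condA s G e k then acc ++ [(k : Int)] else acc := by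
  have hcast : ((k : Int) + (G : Int)) = ((k + G : Nat) : Int) := by push_cast; ring
  unfold safe_list_get condA
  rw [hcast, PySem.List.slice_natCast, PySem.List.slice_to_natCast,
    PySem.List.pyGet?_natCast, PySem.List.slice_from_natCast]
  simp only [Nat.add_sub_cancel_left]
  cases e <;>
    cases hA : ((s.drop k).take G).all pvInQH <;>
    cases hB : ((s.take k).any fun c => c == '#') <;>
    cases hC : pvInQD ((s[k + G]?).getD '.') <;>
    cases hX : (s.drop (k + G)).all pvInQD <;>
    simp [hA, hB, hC, hX]

theorem possible_offsets_eq (sequence : String) (group_len : Int) (end_ : Bool) (h : 0 ≤ group_len) :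
    possible_offsets sequence group_len end_ = possible_offsets_alt sequence group_len end_ := by
  obtain ⟨G, rfl⟩ : ∃ G : Nat, group_len = (G : Int) :=
    ⟨group_len.toNat, (Int.toNat_of_nonneg h).symm⟩
  simp only [possible_offsets, possible_offsets_alt, Int.toNat_natCast]
  generalize sequence.toList = s
  by_cases hGn : G ≤ s.length
  · have hb : (s.length : Int) - (G : Int) + 1 = ((s.length - G + 1 : Nat) : Int) := by
      push_cast
      omega
    rw [hb, PySem.List.pyRange_zero_natCast, List.foldl_map]
    have hcongr := PySem.List.foldl_congr_mem (List.range (s.length - G + 1)) _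
      (fun acc k => if condA s G end_ k then acc ++ [(k : Int)] else acc) ([] : List Int)
      (fun acc k _ => bodyA_eq s G end_ acc k)
    rw [hcongr, PySem.List.foldl_append_if (condA s G end_) (fun k => (k : Int)),
      List.nil_append, List.range_eq_range']
    simpa using main_lemma G end_ s [] (by simp) hGn
  · have hempty : PySem.List.pyRange 0 ((s.length : Int) - (G : Int) + 1) 1 = [] := by
      simp [PySem.List.pyRange]
      omega
    rw [hempty, List.foldl_nil, fwdLoop_nil_of_lt G end_ s 0 (by omega)]

-- ===== VERDICT (by name: the statement is the Claim_ definition above) =====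
theorem possible_offsets_spec : Claim_equal_possible_offsets := by
  intro s g e _ hpre
  exact possible_offsets_eq s g e hpre
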